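-- pv_equiv track=rewrite | github.com/mortyc126-debug/SHA | alg_attack/nc_filter_attack.py | carry_chain
-- ===== SOURCE A (Python) =====
-- def carry_chain(a, b, n=32):
--     """Returns carry vector and transition count."""
--     carry = 0
--     transitions = 0
--     prev_c = 0
--     carry_vec = 0
--     for i in range(n):
--         ai = (a >> i) & 1
--         bi = (b >> i) & 1
--         c = (ai & bi) | (ai & carry) | (bi & carry)
--         carry_vec |= (c << i)
--         if c != prev_c:
--             transitions += 1
--         prev_c = c
--         carry = c
--     return carry_vec, transitions
-- ===== SOURCE B (Python) =====
-- def carry_chain(a, b, n=32):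
--     """Returns carry vector and transition count."""
--     m = max(n, 0)
--     mask = (1 << m) - 1
--     carry_vec = (((a + b) ^ a ^ b) >> 1) & mask
--     transitions = bin((carry_vec ^ (carry_vec << 1)) & mask).count("1")
--     return carry_vec, transitions
-- ===== Notes on version B (the rewrite author's own statement) =====
-- stated objective: faster
-- what changed: Replaced the Python-level per-bit loop maintaining carry/prev_c/transitions state by the closed-form bit identities carry_vec = (((a+b)^a^b)>>1)&mask and transitions = popcount((carry_vec^(carry_vec<<1))&mask), computed with O(n/word) big-int operations.
import Mathlib
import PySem

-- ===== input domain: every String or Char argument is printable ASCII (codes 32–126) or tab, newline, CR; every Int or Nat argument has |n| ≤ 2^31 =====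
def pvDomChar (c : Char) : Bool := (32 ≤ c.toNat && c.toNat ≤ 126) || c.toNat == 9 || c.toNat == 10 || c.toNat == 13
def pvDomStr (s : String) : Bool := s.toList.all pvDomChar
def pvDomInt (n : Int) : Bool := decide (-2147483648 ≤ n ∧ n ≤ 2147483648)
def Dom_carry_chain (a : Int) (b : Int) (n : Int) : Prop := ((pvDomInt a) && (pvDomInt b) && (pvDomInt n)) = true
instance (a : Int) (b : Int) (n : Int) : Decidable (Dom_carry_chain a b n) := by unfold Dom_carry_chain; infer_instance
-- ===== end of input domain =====

-- B replaces A's per-bit carry loop by the closed-form bit identities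
-- carry_vec = (((a+b)^a^b)>>1)&mask and transitions = popcount((carry_vec^(carry_vec<<1))&mask).
-- The Python tuple result (carry_vec, transitions) is rendered as a 2-element list per the type convention.

-- ===== PORT A =====
-- i is drawn from range(0, n), hence 0 ≤ i, so 'i.toNat' is the exact Python shift amount
def carry_chain (a : Int) (b : Int) (n : Int) : List Int :=
  let st := (PySem.List.pyRange 0 n 1).foldl
    (fun (s : Int × Int × Int × Int) (i : Int) =>
      let carry := s.1
      let transitions := s.2.1
      let prev_c := s.2.2.1
      let carry_vec := s.2.2.2
      let ai := PySem.Int.band (a >>> i.toNat) 1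
      let bi := PySem.Int.band (b >>> i.toNat) 1
      let c := PySem.Int.bor (PySem.Int.bor (PySem.Int.band ai bi) (PySem.Int.band ai carry)) (PySem.Int.band bi carry)
      let carry_vec' := PySem.Int.bor carry_vec (c <<< i.toNat)
      let transitions' := if c ≠ prev_c then transitions + 1 else transitions
      (c, transitions', c, carry_vec'))
    (0, 0, 0, 0)
  [st.2.2.2, st.2.1]

-- ===== PORT B =====
-- 'm = max(n, 0)' is a nonnegative shift amount, so '.toNat' is exact;
-- 'bin(x).count("1")' on the nonnegative masked value is PySem.Int.bitCount
def carry_chain_alt (a : Int) (b : Int) (n : Int) : List Int :=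
  let m : Nat := (max n 0).toNat
  let mask : Int := ((1:Int) <<< m) - 1
  let carry_vec := PySem.Int.band ((PySem.Int.bxor (PySem.Int.bxor (a + b) a) b) >>> (1:Nat)) mask
  let transitions : Int := PySem.Int.bitCount (PySem.Int.band (PySem.Int.bxor carry_vec (carry_vec <<< (1:Nat))) mask)
  [carry_vec, transitions]

-- ===== PRECONDITION & SPEC =====
def Spec_carry_chain (a : Int) (b : Int) (n : Int) (out : List Int) : Prop := out = carry_chain_alt a b n
instance (a : Int) (b : Int) (n : Int) (out : List Int) : Decidable (Spec_carry_chain a b n out) := by unfold Spec_carry_chain; infer_instance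

-- ===== CLAIM (what is proved, stated in full; the proofs are below) =====
def Claim_equal_carry_chain : Prop := ∀ (a : Int) (b : Int) (n : Int), Dom_carry_chain a b n → Spec_carry_chain a b n (carry_chain a b n)

-- ===== LEMMAS AND PROOFS =====

/-- bit `k` of the integer `x` in infinite two's complement, as an integer 0 or 1. -/
def bitI (x : Int) (k : Nat) : Int := x / 2 ^ k % 2

/-- the carry INTO bit position `k` when adding `a` and `b`. -/
def Cc (a b : Int) (k : Nat) : Int := (a % 2 ^ k + b % 2 ^ k) / 2 ^ k

/-- carry vector of the first `m` bit positions (bit `i` = carry OUT of position `i`). -/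
def Vv (a b : Int) (m : Nat) : Int := ∑ i ∈ Finset.range m, Cc a b (i + 1) * 2 ^ i

/-- number of carry transitions over the first `m` positions. -/
def Tt (a b : Int) (m : Nat) : Int :=
  ∑ i ∈ Finset.range m, (if Cc a b (i + 1) = Cc a b i then 0 else 1)

theorem bitI_01 (x : Int) (k : Nat) : bitI x k = 0 ∨ bitI x k = 1 := by
  unfold bitI; omega

theorem divmod_neg_sub_one (x p : Int) (hp : 0 < p) :
    (-x - 1) / p = -(x / p) - 1 ∧ (-x - 1) % p = p - 1 - x % p := by
  rw [Int.ediv_emod_unique hp]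
  have h1 := Int.mul_ediv_add_emod x p
  have h2 := Int.emod_nonneg x (by omega : p ≠ 0)
  have h3 := Int.emod_lt_of_pos x hp
  refine ⟨by ring_nf; ring_nf at h1; omega, by omega, by omega⟩

theorem bitI_natCast (m : Nat) (k : Nat) :
    bitI (m : Int) k = if m.testBit k then 1 else 0 := by
  unfold bitI
  rw [Nat.testBit_eq_decide_div_mod_eq]
  have h : ((m / 2 ^ k % 2 : Nat) : Int) = (m : Int) / 2 ^ k % 2 := by push_cast; ring
  rcases Nat.mod_two_eq_zero_or_one (m / 2 ^ k) with h2 | h2 <;> rw [h2] at h <;> simp [← h, h2]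

theorem bitI_neg (y : Nat) (k : Nat) : bitI (-(y : Int) - 1) k = 1 - bitI (y : Int) k := by
  unfold bitI
  have hp : (0:Int) < 2 ^ k := by positivity
  rw [(divmod_neg_sub_one (y:Int) (2^k) hp).1]
  have : (-((y:Int) / 2 ^ k) - 1) % 2 = 2 - 1 - ((y:Int) / 2^k) % 2 := (divmod_neg_sub_one _ 2 (by norm_num)).2
  omega

theorem bxor_bit (x y : Int) (k : Nat) :
    bitI (PySem.Int.bxor x y) k = (bitI x k + bitI y k) % 2 := by
  unfold PySem.Int.bxor
  split_ifs with hx hy hy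
  · conv_rhs => rw [← Int.toNat_of_nonneg hx, ← Int.toNat_of_nonneg hy]
    rw [bitI_natCast, bitI_natCast, bitI_natCast, Nat.testBit_xor]
    cases x.toNat.testBit k <;> cases y.toNat.testBit k <;> norm_num
  · have hy' : y = -((-y - 1).toNat : Int) - 1 := by omega
    rw [show -((x.toNat ^^^ (-y-1).toNat : Nat) : Int) - 1 = -(((x.toNat ^^^ (-y-1).toNat : Nat) : Int)) - 1 from rfl,
      bitI_neg]
    conv_rhs => rw [← Int.toNat_of_nonneg hx, hy']
    rw [bitI_neg, bitI_natCast, bitI_natCast, bitI_natCast, Nat.testBit_xor]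
    cases x.toNat.testBit k <;> cases (-y-1).toNat.testBit k <;> norm_num
  · have hx' : x = -(((-x - 1).toNat : Nat) : Int) - 1 := by omega
    rw [bitI_neg]
    conv_rhs => rw [hx', ← Int.toNat_of_nonneg hy]
    rw [bitI_neg, bitI_natCast, bitI_natCast, bitI_natCast, Nat.testBit_xor]
    cases (-x-1).toNat.testBit k <;> cases y.toNat.testBit k <;> norm_num
  · have hx' : x = -(((-x - 1).toNat : Nat) : Int) - 1 := by omega
    have hy' : y = -(((-y - 1).toNat : Nat) : Int) - 1 := by omega
    conv_rhs => rw [hx', hy']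
    rw [bitI_neg, bitI_neg, bitI_natCast, bitI_natCast, bitI_natCast, Nat.testBit_xor]
    cases (-x-1).toNat.testBit k <;> cases (-y-1).toNat.testBit k <;> norm_num

theorem band_mask (x : Int) (m : Nat) :
    PySem.Int.band x (2 ^ m - 1) = x % 2 ^ m := by
  have hpow : ((2:Nat) ^ m : Int) = (2:Int) ^ m := by push_cast; ring
  have h1m : (1:Int) ≤ 2 ^ m := by exact_mod_cast Nat.one_le_two_pow
  have hm : ((2:Int) ^ m - 1).toNat = 2 ^ m - 1 := by omega
  unfold PySem.Int.band
  split_ifs with hx hy hy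
  · rw [hm, Nat.and_two_pow_sub_one_eq_mod]
    have : x = (x.toNat : Int) := by omega
    rw [this]; push_cast; rfl
  · omega
  · rw [hm, Nat.land_comm, Nat.and_two_pow_sub_one_eq_mod]
    have hy2 : ((-x - 1).toNat : Int) = -x - 1 := by omega
    have h1 := (divmod_neg_sub_one (-x-1) (2^m) (by positivity)).2
    have h2 : -(-x - 1) - 1 = x := by ring
    rw [h2] at h1
    have h3 : ((-x-1).toNat % 2 ^ m : Nat) ≤ 2 ^ m - 1 := by
      have := Nat.mod_lt (-x-1).toNat (y := 2^m) (by positivity); omega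
    have h4 : (((-x-1).toNat % 2 ^ m : Nat) : Int) = (-x-1) % 2 ^ m := by
      push_cast [hy2]; ring
    omega
  · omega

theorem emod_two_pow_succ (x : Int) (m : Nat) :
    x % 2 ^ (m + 1) = x % 2 ^ m + bitI x m * 2 ^ m := by
  have hp : (0:Int) < 2 ^ m := by positivity
  have h1 := Int.mul_ediv_add_emod x (2 ^ m)
  have h2 := Int.emod_nonneg x (by omega : (2:Int)^m ≠ 0)
  have h3 := Int.emod_lt_of_pos x hp
  have key : x % 2 ^ (m+1) = bitI x m * 2 ^ m + x % 2 ^ m := by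
    have := (Int.ediv_emod_unique (a := x) (b := 2^(m+1)) (q := x / 2^m / 2)
      (r := bitI x m * 2 ^ m + x % 2 ^ m) (by positivity)).mpr ?_
    · exact this.2
    · unfold bitI
      have h4 := Int.mul_ediv_add_emod (x / 2 ^ m) 2
      have h5 : x / 2^m % 2 = 0 ∨ x / 2^m % 2 = 1 := by omega
      refine ⟨by rw [pow_succ]; nlinarith [h4, h1],
        by rcases h5 with h | h <;> rw [h] <;> omega,
        by rcases h5 with h | h <;> rw [h] <;> rw [pow_succ] <;> omega⟩
  omega

theorem emod_eq_sum_bits (x : Int) (m : Nat) :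
    x % 2 ^ m = ∑ k ∈ Finset.range m, bitI x k * 2 ^ k := by
  induction m with
  | zero => simp
  | succ m ih => rw [emod_two_pow_succ, Finset.sum_range_succ, ih]

theorem bitI_emod (x : Int) (m k : Nat) (h : k < m) : bitI (x % 2 ^ m) k = bitI x k := by
  unfold bitI
  have hsplit : (2:Int) ^ m = 2 ^ (m - k - 1) * 2 ^ k * 2 := by
    rw [mul_assoc, ← pow_succ, ← pow_add]; congr 1; omega
  have hd : x % 2 ^ m = x + (2 * (-(x / 2 ^ m) * 2 ^ (m - k - 1))) * 2 ^ k := by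
    have h1 := Int.mul_ediv_add_emod x (2 ^ m)
    linear_combination h1 - x / 2 ^ m * hsplit
  rw [hd, Int.add_mul_ediv_right _ _ (by positivity : (2:Int)^k ≠ 0)]
  omega

theorem sumdiv (a b : Int) (k : Nat) :
    (a + b) / 2 ^ k = a / 2 ^ k + b / 2 ^ k + Cc a b k := by
  have hp : (0:Int) < 2 ^ k := by positivity
  have ha := Int.mul_ediv_add_emod a (2 ^ k)
  have hb := Int.mul_ediv_add_emod b (2 ^ k)
  have hc := Int.mul_ediv_add_emod (a % 2^k + b % 2^k) (2 ^ k)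
  have hr0 := Int.emod_nonneg (a % 2^k + b % 2^k) (by omega : (2:Int)^k ≠ 0)
  have hr1 := Int.emod_lt_of_pos (a % 2^k + b % 2^k) hp
  have := (Int.ediv_emod_unique (a := a + b) (b := 2^k)
      (q := a / 2 ^ k + b / 2 ^ k + Cc a b k) (r := (a % 2^k + b % 2^k) % 2^k) hp).mpr ?_
  · exact this.1
  · refine ⟨?_, hr0, hr1⟩
    unfold Cc; nlinarith [ha, hb, hc]

theorem Cc_01 (a b : Int) (k : Nat) : Cc a b k = 0 ∨ Cc a b k = 1 := by
  have hp : (0:Int) < 2 ^ k := by positivity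
  have ha0 := Int.emod_nonneg a (by omega : (2:Int)^k ≠ 0)
  have ha1 := Int.emod_lt_of_pos a hp
  have hb0 := Int.emod_nonneg b (by omega : (2:Int)^k ≠ 0)
  have hb1 := Int.emod_lt_of_pos b hp
  unfold Cc
  have h0 : 0 ≤ (a % 2^k + b % 2^k) / 2^k := Int.ediv_nonneg (by omega) (by omega)
  have h1 : (a % 2^k + b % 2^k) / 2^k < 2 := by
    rw [Int.ediv_lt_iff_lt_mul hp]; omega
  omega

theorem Cc_zero (a b : Int) : Cc a b 0 = 0 := by
  simp [Cc]

theorem bit_xor3 (a b : Int) (k : Nat) :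
    bitI (PySem.Int.bxor (PySem.Int.bxor (a + b) a) b) k = Cc a b k := by
  rw [bxor_bit, bxor_bit]
  have hs : bitI (a + b) k = (a / 2 ^ k + b / 2 ^ k + Cc a b k) % 2 := by
    unfold bitI; rw [sumdiv]
  have hC := Cc_01 a b k
  unfold bitI at *
  omega

theorem Cc_succ (a b : Int) (m : Nat) :
    Cc a b (m + 1) = (bitI a m + bitI b m + Cc a b m) / 2 := by
  have hp : (0:Int) < 2 ^ m := by positivity
  have hma := emod_two_pow_succ a m
  have hmb := emod_two_pow_succ b m
  have hc : 2 ^ m * Cc a b m + (a % 2 ^ m + b % 2 ^ m) % 2 ^ m = a % 2 ^ m + b % 2 ^ m := by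
    unfold Cc; exact Int.mul_ediv_add_emod _ _
  have hr0 := Int.emod_nonneg (a % 2 ^ m + b % 2 ^ m) (by omega : (2:Int) ^ m ≠ 0)
  have hr1 := Int.emod_lt_of_pos (a % 2 ^ m + b % 2 ^ m) hp
  have hM := Cc_01 a b m
  have hA : bitI a m = 0 ∨ bitI a m = 1 := by unfold bitI; omega
  have hB : bitI b m = 0 ∨ bitI b m = 1 := by unfold bitI; omega
  have hq := Int.mul_ediv_add_emod (bitI a m + bitI b m + Cc a b m) 2
  have hr2 : (bitI a m + bitI b m + Cc a b m) % 2 = 0 ∨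
      (bitI a m + bitI b m + Cc a b m) % 2 = 1 := by omega
  show (a % 2 ^ (m + 1) + b % 2 ^ (m + 1)) / 2 ^ (m + 1) = (bitI a m + bitI b m + Cc a b m) / 2
  rw [hma, hmb]
  have := (Int.ediv_emod_unique
      (a := a % 2 ^ m + bitI a m * 2 ^ m + (b % 2 ^ m + bitI b m * 2 ^ m)) (b := 2 ^ (m + 1))
      (q := (bitI a m + bitI b m + Cc a b m) / 2)
      (r := ((bitI a m + bitI b m + Cc a b m) % 2) * 2 ^ m + (a % 2 ^ m + b % 2 ^ m) % 2 ^ m)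
      (by positivity)).mpr ?_
  · exact this.1
  · refine ⟨by rw [pow_succ]; linear_combination (2:Int) ^ m * hq + hc,
      by rcases hr2 with h | h <;> rw [h] <;> omega,
      by rcases hr2 with h | h <;> rw [h] <;> rw [pow_succ] <;> omega⟩

theorem maj_eval (x y z : Int) (hx : x = 0 ∨ x = 1) (hy : y = 0 ∨ y = 1) (hz : z = 0 ∨ z = 1) :
    PySem.Int.bor (PySem.Int.bor (PySem.Int.band x y) (PySem.Int.band x z)) (PySem.Int.band y z)
      = (x + y + z) / 2 := by
  rcases hx with rfl | rfl <;> rcases hy with rfl | rfl <;> rcases hz with rfl | rfl <;> decide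

theorem lor_disjoint (u : Nat) (i : Nat) (h : u < 2 ^ i) : u ||| 2 ^ i = u + 2 ^ i := by
  apply Nat.eq_of_testBit_eq
  intro j
  rw [Nat.testBit_lor, Nat.add_comm]
  rcases lt_trichotomy j i with hj | rfl | hj
  · rw [Nat.testBit_two_pow_add_gt hj]
    have : (2 ^ i).testBit j = false := by rw [Nat.testBit_two_pow]; simp; omega
    simp [this]
  · rw [Nat.testBit_two_pow_add_eq, Nat.testBit_lt_two_pow h]
    simp
  · have h2 : 2 ^ i + u < 2 ^ j := by
      calc 2 ^ i + u < 2 ^ i + 2 ^ i := by omega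
      _ = 2 ^ (i + 1) := by rw [pow_succ]; omega
      _ ≤ 2 ^ j := Nat.pow_le_pow_right (by norm_num) (by omega)
    rw [Nat.testBit_lt_two_pow h2, Nat.testBit_lt_two_pow (by omega : u < 2 ^ j)]
    have : (2 ^ i).testBit j = false := by rw [Nat.testBit_two_pow]; simp; omega
    simp [this]

theorem bor_disjoint (u c : Int) (i : Nat) (h0 : 0 ≤ u) (h : u < 2 ^ i) (hc : c = 0 ∨ c = 1) :
    PySem.Int.bor u (c <<< i) = u + c * 2 ^ i := by
  rcases hc with rfl | rfl
  · rw [show ((0:Int) <<< i) = 0 by simp [Int.shiftLeft_eq], PySem.Int.bor_zero]; ring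
  · have h1 : (1:Int) <<< i = 2 ^ i := by rw [Int.shiftLeft_eq]; ring
    have hpow : ((2:Nat) ^ i : Int) = (2:Int) ^ i := by push_cast; ring
    rw [h1, PySem.Int.bor_of_nonneg h0 (by positivity)]
    have h2 : ((2:Int) ^ i).toNat = 2 ^ i := by omega
    rw [h2, lor_disjoint u.toNat i (by omega)]
    push_cast; omega

theorem bitCount_sum (t : Int) (m : Nat) (h0 : 0 ≤ t) (h : t < 2 ^ m) :
    (PySem.Int.bitCount t : Int) = ∑ k ∈ Finset.range m, bitI t k := by
  have hpow : ((2:Nat) ^ m : Int) = (2:Int) ^ m := by push_cast; ring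
  have ht : t = (t.toNat : Int) := by omega
  rw [ht]
  have htm : t.toNat < 2 ^ m := by omega
  clear ht h h0 hpow
  generalize t.toNat = u at htm ⊢
  induction m generalizing u with
  | zero =>
    interval_cases u
    simp [PySem.Int.bitCount_zero]
  | succ m ih =>
    rcases Nat.eq_zero_or_pos u with rfl | hu
    · rw [Finset.sum_eq_zero (by intro k _; simp [bitI])]
      simp [PySem.Int.bitCount_zero]
    · have hdiv : u / 2 < 2 ^ m := by
        rw [pow_succ] at htm; omega
      have hb : ∀ k : Nat, bitI ((u : Nat) : Int) (k + 1) = bitI ((u / 2 : Nat) : Int) k := by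
        intro k
        unfold bitI
        have : ((u / 2 : Nat) : Int) = (u : Int) / 2 := by push_cast; ring
        rw [this, Int.ediv_ediv_eq_ediv_mul (by norm_num), ← pow_succ']
      have h0' : bitI ((u : Nat) : Int) 0 = ((u % 2 : Nat) : Int) := by
        unfold bitI; push_cast; simp
      have ih' := ih (u / 2) hdiv
      rw [PySem.Int.bitCount_natCast hu, Finset.sum_range_succ']
      push_cast at ih' hb h0' ⊢
      rw [ih', Finset.sum_congr rfl (fun k _ => hb k), h0']
      ring

theorem bitI_half (x : Int) (k : Nat) : bitI (x / 2) k = bitI x (k + 1) := by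
  unfold bitI
  rw [Int.ediv_ediv_eq_ediv_mul (by norm_num), ← pow_succ']

theorem cv_eq (a b : Int) (m : Nat) :
    (PySem.Int.bxor (PySem.Int.bxor (a + b) a) b) >>> (1:Nat) % 2 ^ m = Vv a b m := by
  rw [Int.shiftRight_eq_div_pow]
  norm_num
  rw [emod_eq_sum_bits]
  unfold Vv
  refine Finset.sum_congr rfl (fun k _ => ?_)
  rw [bitI_half, bit_xor3]

theorem Vv_bounds (a b : Int) (m : Nat) : 0 ≤ Vv a b m ∧ Vv a b m < 2 ^ m := by
  rw [← cv_eq]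
  have hp : (0:Int) < 2 ^ m := by positivity
  exact ⟨Int.emod_nonneg _ (by omega), Int.emod_lt_of_pos _ hp⟩

theorem bitI_Vv (a b : Int) (m k : Nat) (h : k < m) : bitI (Vv a b m) k = Cc a b (k + 1) := by
  rw [← cv_eq, Int.shiftRight_eq_div_pow]
  norm_num
  rw [bitI_emod _ _ _ h, bitI_half, bit_xor3]

theorem bitI_two_mul_zero (x : Int) : bitI (2 * x) 0 = 0 := by
  unfold bitI; omega

theorem bitI_two_mul_succ (x : Int) (k : Nat) : bitI (2 * x) (k + 1) = bitI x k := by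
  unfold bitI
  rw [pow_succ', Int.mul_ediv_mul_of_pos _ _ (by norm_num : (0:Int) < 2)]

theorem trans_eq (a b : Int) (m : Nat) :
    (PySem.Int.bitCount (PySem.Int.band
        (PySem.Int.bxor (Vv a b m) (Vv a b m <<< (1:Nat))) (2 ^ m - 1)) : Int) = Tt a b m := by
  have hsh : Vv a b m <<< (1:Nat) = 2 * Vv a b m := by
    rw [Int.shiftLeft_eq]; ring
  have hp : (0:Int) < 2 ^ m := by positivity
  rw [hsh, band_mask]
  rw [bitCount_sum _ m (Int.emod_nonneg _ (by omega)) (Int.emod_lt_of_pos _ hp)]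
  unfold Tt
  refine Finset.sum_congr rfl (fun k hk => ?_)
  have hk' : k < m := Finset.mem_range.mp hk
  rw [bitI_emod _ _ _ hk', bxor_bit]
  cases k with
  | zero =>
    rw [bitI_two_mul_zero, bitI_Vv a b m 0 hk', Cc_zero]
    rcases Cc_01 a b 1 with h | h <;> rw [h] <;> norm_num
  | succ j =>
    rw [bitI_two_mul_succ, bitI_Vv a b m (j+1) hk', bitI_Vv a b m j (by omega)]
    rcases Cc_01 a b (j + 2) with h | h <;> rcases Cc_01 a b (j + 1) with h2 | h2 <;>
      rw [h, h2] <;> norm_num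

theorem band1_bit (a : Int) (m : Nat) : PySem.Int.band (a >>> m) 1 = bitI a m := by
  rw [PySem.Int.band_one, PySem.Int.mod_eq_emod_of_pos (by norm_num), Int.shiftRight_eq_div_pow]
  unfold bitI
  norm_num

theorem fold_inv (a b : Int) (m : Nat) :
    ((PySem.List.pyRange 0 (m : Int) 1).foldl
      (fun (s : Int × Int × Int × Int) (i : Int) =>
        let carry := s.1
        let transitions := s.2.1
        let prev_c := s.2.2.1
        let carry_vec := s.2.2.2
        let ai := PySem.Int.band (a >>> i.toNat) 1
        let bi := PySem.Int.band (b >>> i.toNat) 1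
        let c := PySem.Int.bor (PySem.Int.bor (PySem.Int.band ai bi) (PySem.Int.band ai carry)) (PySem.Int.band bi carry)
        let carry_vec' := PySem.Int.bor carry_vec (c <<< i.toNat)
        let transitions' := if c ≠ prev_c then transitions + 1 else transitions
        (c, transitions', c, carry_vec'))
      (0, 0, 0, 0)) = (Cc a b m, Tt a b m, Cc a b m, Vv a b m) := by
  induction m with
  | zero =>
    rw [show ((0:Nat):Int) = 0 by norm_num, PySem.List.pyRange_one_eq_nil (le_refl 0)]
    simp [Tt, Vv, Cc_zero]
  | succ m ih =>
    rw [show ((m+1:Nat):Int) = (m:Int) + 1 by push_cast; ring,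
      PySem.List.pyRange_one_succ_right (by exact_mod_cast Nat.zero_le m), List.foldl_append, ih,
      List.foldl_cons, List.foldl_nil]
    dsimp only [Int.toNat_natCast]
    rw [band1_bit, band1_bit,
      maj_eval _ _ _ (bitI_01 a m) (bitI_01 b m) (Cc_01 a b m), ← Cc_succ,
      bor_disjoint _ _ _ (Vv_bounds a b m).1 (Vv_bounds a b m).2 (Cc_01 a b (m+1))]
    simp only [Prod.mk.injEq]
    refine ⟨trivial, ?_, trivial, ?_⟩
    · by_cases h : Cc a b (m+1) = Cc a b m
      · simp [h, Tt, Finset.sum_range_succ]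
      · simp [h, Tt, Finset.sum_range_succ]
    · simp [Vv, Finset.sum_range_succ]

-- ===== VERDICT (by name: the statement is the Claim_ definition above) =====
theorem carry_chain_spec : Claim_equal_carry_chain := by
  intro a b n _
  unfold Spec_carry_chain carry_chain carry_chain_alt
  have hm : (max n 0).toNat = n.toNat := by omega
  have hr : PySem.List.pyRange 0 n 1 = PySem.List.pyRange 0 ((n.toNat : Nat) : Int) 1 := by
    rcases le_or_gt n 0 with h | h
    · have h0 : ((n.toNat : Nat) : Int) = 0 := by omega
      rw [PySem.List.pyRange_one_eq_nil h, h0, PySem.List.pyRange_one_eq_nil (le_refl 0)]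
    · congr 1; omega
  rw [hr, fold_inv a b n.toNat, hm]
  dsimp only
  have hmask : (1:Int) <<< n.toNat - 1 = 2 ^ n.toNat - 1 := by
    rw [Int.shiftLeft_eq]; ring
  rw [hmask]
  rw [show PySem.Int.band ((PySem.Int.bxor (PySem.Int.bxor (a + b) a) b) >>> (1:Nat)) (2 ^ n.toNat - 1)
      = Vv a b n.toNat from by rw [band_mask, cv_eq]]
  rw [trans_eq]
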